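-- pv_equiv track=rewrite | github.com/131250208/InfExtraction | InfExtraction/modules/utils.py | get_tok2char_span_map4ch
-- ===== SOURCE A (Python) =====
-- def get_tok2char_span_map4ch(word_list):
--     text_fr_word_list = ""
--     word2char_span = []
--     for word in word_list:
--         char_span = [len(text_fr_word_list), len(text_fr_word_list) + len(word)]
--         text_fr_word_list += word
--         word2char_span.append(char_span)
--     return word2char_span
-- ===== SOURCE B (Python) =====
-- def get_tok2char_span_map4ch(word_list):
--     # Running integer offset: compute the end offset of each word in one pass,
--     # then derive each span from its end and the word's length; no string is built.
--     ends = []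
--     total = 0
--     for w in word_list:
--         total += len(w)
--         ends.append(total)
--     return [[e - len(w), e] for w, e in zip(word_list, ends)]
-- ===== Notes on version B (the rewrite author's own statement) =====
-- stated objective: alternative
-- what changed: Replaces the concatenated-string accumulator with a running integer offset: one pass computes cumulative end offsets, a second derives each [start,end] from end minus word length.
import Mathlib
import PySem

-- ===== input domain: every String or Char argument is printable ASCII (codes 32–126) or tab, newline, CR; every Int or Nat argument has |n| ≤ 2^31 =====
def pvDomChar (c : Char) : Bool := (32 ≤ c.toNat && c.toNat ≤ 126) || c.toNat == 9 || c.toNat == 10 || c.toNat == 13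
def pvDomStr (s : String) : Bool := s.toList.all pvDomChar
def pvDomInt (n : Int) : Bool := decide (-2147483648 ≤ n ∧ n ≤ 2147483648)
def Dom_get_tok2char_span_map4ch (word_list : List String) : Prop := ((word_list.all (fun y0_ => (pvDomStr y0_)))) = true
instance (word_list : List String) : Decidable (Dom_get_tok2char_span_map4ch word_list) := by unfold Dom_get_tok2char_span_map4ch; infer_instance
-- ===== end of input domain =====

-- B replaces A's concatenated-string accumulator with a running integer offset
-- (one pass of cumulative ends, then spans from end minus word length); alternative, no string is built.


-- ===== PORT A =====
-- text_fr_word_list is kept as a List Char (Python str over the ASCII domain);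
-- each iteration appends the span [len(text), len(text)+len(word)] and concatenates.
def get_tok2char_span_map4ch (word_list : List String) : List (List Int) :=
  (word_list.foldl
    (fun (st : List Char × List (List Int)) word =>
      let span : List Int := [(st.1.length : Int), (st.1.length : Int) + (word.toList.length : Int)]
      (st.1 ++ word.toList, st.2 ++ [span]))
    (([] : List Char), ([] : List (List Int)))).2

-- ===== PORT B =====
-- First pass: cumulative end offsets (running integer total). Second: spans from ends.
def get_tok2char_span_map4ch_alt (word_list : List String) : List (List Int) :=
  let ends :=
    (word_list.foldl
      (fun (st : Int × List Int) w =>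
        (st.1 + (w.toList.length : Int), st.2 ++ [st.1 + (w.toList.length : Int)]))
      ((0 : Int), ([] : List Int))).2
  (word_list.zip ends).map (fun p => [p.2 - (p.1.toList.length : Int), p.2])

-- ===== PRECONDITION & SPEC =====
def Spec_get_tok2char_span_map4ch (word_list : List String) (out : List (List Int)) : Prop := out = get_tok2char_span_map4ch_alt word_list
instance (word_list : List String) (out : List (List Int)) : Decidable (Spec_get_tok2char_span_map4ch word_list out) := by unfold Spec_get_tok2char_span_map4ch; infer_instance

-- ===== CLAIM (what is proved, stated in full; the proofs are below) =====
def Claim_equal_get_tok2char_span_map4ch : Prop := ∀ (word_list : List String), Dom_get_tok2char_span_map4ch word_list → Spec_get_tok2char_span_map4ch word_list (get_tok2char_span_map4ch word_list)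

-- ===== LEMMAS AND PROOFS =====

/-- Reference spans: [off, off+len w] for each word, offsets accumulating. -/
def pvSpans (ws : List String) (off : Int) : List (List Int) :=
  match ws with
  | [] => []
  | w :: rest => [off, off + (w.toList.length : Int)] :: pvSpans rest (off + (w.toList.length : Int))

/-- Reference cumulative ends. -/
def pvEnds (ws : List String) (off : Int) : List Int :=
  match ws with
  | [] => []
  | w :: rest => (off + (w.toList.length : Int)) :: pvEnds rest (off + (w.toList.length : Int))

lemma foldA_eq (ws : List String) (t : List Char) (acc : List (List Int)) :
    (ws.foldl
      (fun (st : List Char × List (List Int)) word =>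
        let span : List Int := [(st.1.length : Int), (st.1.length : Int) + (word.toList.length : Int)]
        (st.1 ++ word.toList, st.2 ++ [span]))
      (t, acc)).2 = acc ++ pvSpans ws (t.length : Int) := by
  induction ws generalizing t acc with
  | nil => simp [pvSpans]
  | cons w rest ih =>
    simp only [List.foldl_cons, pvSpans, ih]
    simp

lemma foldB_eq (ws : List String) (o : Int) (acc : List Int) :
    (ws.foldl
      (fun (st : Int × List Int) w =>
        (st.1 + (w.toList.length : Int), st.2 ++ [st.1 + (w.toList.length : Int)]))
      (o, acc)).2 = acc ++ pvEnds ws o := by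
  induction ws generalizing o acc with
  | nil => simp [pvEnds]
  | cons w rest ih =>
    simp only [List.foldl_cons, pvEnds, ih]
    simp

lemma zip_ends_eq (ws : List String) (o : Int) :
    (ws.zip (pvEnds ws o)).map (fun p => [p.2 - (p.1.toList.length : Int), p.2]) = pvSpans ws o := by
  induction ws generalizing o with
  | nil => simp [pvEnds, pvSpans]
  | cons w rest ih =>
    simp only [pvEnds, pvSpans, List.zip_cons_cons, List.map_cons, List.cons.injEq]
    exact ⟨by ring_nf; simp, ih _⟩

-- ===== VERDICT (by name: the statement is the Claim_ definition above) =====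
theorem get_tok2char_span_map4ch_spec : Claim_equal_get_tok2char_span_map4ch := by
  intro ws _
  show get_tok2char_span_map4ch ws = get_tok2char_span_map4ch_alt ws
  unfold get_tok2char_span_map4ch get_tok2char_span_map4ch_alt
  rw [foldA_eq, foldB_eq]
  simp only [List.nil_append, List.length_nil, Int.natCast_zero]
  exact (zip_ends_eq ws 0).symm
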